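-- pv_equiv track=rewrite | github.com/IldenH/projects | challenges/ainm2026/marl/simulator.py | best_approach
-- ===== SOURCE A (Python) =====
-- def bfs_next_step(
--     start: tuple[int, int],
--     goal: tuple[int, int],
--     wall_set: set[tuple[int, int]],
--     width: int,
--     height: int,
--     occupied: set[tuple[int, int]] | None = None,
-- ) -> tuple[tuple[int, int], int]:
--     """
--     BFS from start toward goal, avoiding walls (and optionally occupied cells).
--     Returns (next_cell, distance).  If unreachable returns (start, 9999).
--     """
--     if start == goal:
--         return start, 0
--     from collections import deque
--     blocked = wall_set | (occupied or set()) - {start, goal}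
--     queue = deque([(start, 0, None)])  # (pos, dist, first_step)
--     visited = {start}
--     while queue:
--         pos, dist, first = queue.popleft()
--         x, y = pos
--         for nx, ny in [(x, y-1), (x, y+1), (x-1, y), (x+1, y)]:
--             if not (0 <= nx < width and 0 <= ny < height):
--                 continue
--             npos = (nx, ny)
--             if npos in visited or npos in blocked:
--                 continue
--             visited.add(npos)
--             step = first if first is not None else npos
--             if npos == goal:
--                 return step, dist + 1
--             queue.append((npos, dist + 1, step))
--     return start, 9999
--
-- def best_approach(
--     start: tuple[int, int],
--     item_pos: tuple[int, int],
--     wall_set: set[tuple[int, int]],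
--     width: int,
--     height: int,
-- ) -> tuple[tuple[int, int], int]:
--     """
--     Find the best walkable cell adjacent to item_pos and BFS to it.
--     Items sit on walls — you approach an adjacent walkable cell to pick up.
--     Returns (next_step, total_distance).
--     """
--     ix, iy = item_pos
--     candidates = []
--     for nx, ny in [(ix, iy-1), (ix, iy+1), (ix-1, iy), (ix+1, iy)]:
--         if 0 <= nx < width and 0 <= ny < height and (nx, ny) not in wall_set:
--             nc, d = bfs_next_step(start, (nx, ny), wall_set, width, height)
--             candidates.append((d, nc))
--     if not candidates:
--         return start, 9999
--     candidates.sort()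
--     return candidates[0][1], candidates[0][0]
-- ===== SOURCE B (Python) =====
-- def best_approach(start, item_pos, wall_set, width, height):
--     from collections import deque
--     # One BFS from start, recording (distance, first-step) for every reached cell,
--     # stopped as soon as every walkable neighbor of item_pos has been visited.
--     ix, iy = item_pos
--     targets = [
--         c for c in ((ix, iy - 1), (ix, iy + 1), (ix - 1, iy), (ix + 1, iy))
--         if 0 <= c[0] < width and 0 <= c[1] < height and c not in wall_set
--     ]
--     info = {}
--     visited = {start}
--     queue = deque([(start, 0, None)])
--     while queue:
--         if all(t in visited for t in targets):
--             break
--         pos, dist, first = queue.popleft()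
--         x, y = pos
--         for npos in ((x, y - 1), (x, y + 1), (x - 1, y), (x + 1, y)):
--             nx, ny = npos
--             if (0 <= nx < width and 0 <= ny < height
--                     and npos not in visited and npos not in wall_set):
--                 visited.add(npos)
--                 step = npos if first is None else first
--                 info[npos] = (dist + 1, step)
--                 queue.append((npos, dist + 1, step))
--     candidates = [
--         (0, start) if c == start else info.get(c, (9999, start))
--         for c in targets
--     ]
--     if not candidates:
--         return start, 9999
--     d, nc = min(candidates)
--     return nc, d
-- ===== Notes on version B (the rewrite author's own statement) =====
-- stated objective: alternative
-- what changed: Instead of running a separate goal-stopped BFS from start for each of the up-to-4 walkable neighbors of item_pos and sorting the (distance, next_cell) pairs, B runs one BFS from start that records (distance, first-step) for every reached cell (stopping once all those neighbors are visited) and then takes the minimum over direct table lookups.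
import Mathlib
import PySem

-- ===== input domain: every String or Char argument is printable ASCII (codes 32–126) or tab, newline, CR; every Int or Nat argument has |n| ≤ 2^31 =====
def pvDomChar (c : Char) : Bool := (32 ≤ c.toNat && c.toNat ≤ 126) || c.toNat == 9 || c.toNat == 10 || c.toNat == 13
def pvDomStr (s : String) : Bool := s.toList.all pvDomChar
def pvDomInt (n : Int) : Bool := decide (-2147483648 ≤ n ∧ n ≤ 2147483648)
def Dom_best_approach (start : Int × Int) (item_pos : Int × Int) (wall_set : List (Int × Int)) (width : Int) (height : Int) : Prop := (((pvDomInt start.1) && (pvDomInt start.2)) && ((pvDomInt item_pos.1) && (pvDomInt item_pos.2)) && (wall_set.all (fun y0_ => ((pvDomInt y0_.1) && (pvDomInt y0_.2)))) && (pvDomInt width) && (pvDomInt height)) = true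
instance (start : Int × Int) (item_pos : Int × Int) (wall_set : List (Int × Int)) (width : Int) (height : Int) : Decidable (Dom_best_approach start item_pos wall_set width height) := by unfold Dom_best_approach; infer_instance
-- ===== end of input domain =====

-- B replaces A's per-candidate goal-stopped BFS runs (up to 4) by ONE BFS from start
-- recording (distance, first step) for every reachable cell, then a minimum over lookups.

-- ===== PORT A =====
-- In A's Python, `blocked = wall_set | (occupied or set()) - {start, goal}`; with occupied = None
-- this is wall_set | (set() - {start, goal}) = wall_set ('-' binds tighter than '|'), so the
-- port uses wall_set directly.
-- Inner neighbour loop of bfs_next_step: early return (.inl) on discovering the goal,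
-- otherwise (.inr) the updated (queue, visited).
def bfsInnerA (goal : Int × Int) (wall_set : List (Int × Int)) (width height dist : Int)
    (first : Option (Int × Int)) :
    List (Int × Int) → List ((Int × Int) × Int × Option (Int × Int)) → List (Int × Int) →
    ((Int × Int) × Int) ⊕ (List ((Int × Int) × Int × Option (Int × Int)) × List (Int × Int))
  | [], q, v => .inr (q, v)
  | n :: ns, q, v =>
    if ¬ (0 ≤ n.1 ∧ n.1 < width ∧ 0 ≤ n.2 ∧ n.2 < height) then
      bfsInnerA goal wall_set width height dist first ns q v
    else if n ∈ v ∨ n ∈ wall_set then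
      bfsInnerA goal wall_set width height dist first ns q v
    else
      let v' := PySem.Set.add v n
      let step := first.getD n
      if n = goal then .inl (step, dist + 1)
      else bfsInnerA goal wall_set width height dist first ns (q ++ [(n, dist + 1, some step)]) v'

-- the `while queue:` loop; fuel w*h+1 bounds the number of pops (each pop was a push of a fresh
-- in-bounds cell, or the initial start entry), so fuel never runs out with a nonempty queue
def bfsLoopA (start goal : Int × Int) (wall_set : List (Int × Int)) (width height : Int) :
    Nat → List ((Int × Int) × Int × Option (Int × Int)) → List (Int × Int) → (Int × Int) × Int
  | 0, _, _ => (start, 9999)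
  | _ + 1, [], _ => (start, 9999)
  | fuel + 1, (pos, dist, first) :: qs, v =>
    match bfsInnerA goal wall_set width height dist first
        [(pos.1, pos.2 - 1), (pos.1, pos.2 + 1), (pos.1 - 1, pos.2), (pos.1 + 1, pos.2)] qs v with
    | .inl r => r
    | .inr (q', v') => bfsLoopA start goal wall_set width height fuel q' v'

def bfs_next_step (start goal : Int × Int) (wall_set : List (Int × Int)) (width height : Int) :
    (Int × Int) × Int :=
  if start = goal then (start, 0)
  else bfsLoopA start goal wall_set width height (width.toNat * height.toNat + 1)
    [(start, 0, none)] [start]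

-- `nc, d = bfs_next_step(...); candidates.append((d, nc))`
def candA (start : Int × Int) (wall_set : List (Int × Int)) (width height : Int)
    (n : Int × Int) : Int × Int × Int :=
  let r := bfs_next_step start n wall_set width height
  (r.2, r.1)

def best_approach (start : Int × Int) (item_pos : Int × Int) (wall_set : List (Int × Int)) (width : Int) (height : Int) : (Int × Int) × Int :=
  let candidates :=
    [(item_pos.1, item_pos.2 - 1), (item_pos.1, item_pos.2 + 1),
     (item_pos.1 - 1, item_pos.2), (item_pos.1 + 1, item_pos.2)].foldl
      (fun acc n =>
        if (decide (0 ≤ n.1 ∧ n.1 < width ∧ 0 ≤ n.2 ∧ n.2 < height ∧ n ∉ wall_set)) = true then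
          acc ++ [candA start wall_set width height n]
        else acc) []
  -- candidates.sort() : Python tuple comparison = lexicographic (d, (x, y))
  match PySem.List.sorted candidates (fun c => toLex (c.1, toLex c.2)) false with
  | [] => (start, 9999)
  | c :: _ => (c.2, c.1)

-- ===== PORT B =====
-- neighbour loop of the single BFS: threads (queue, visited, info) with no early exit
def bfsInnerB (wall_set : List (Int × Int)) (width height dist : Int)
    (first : Option (Int × Int)) :
    List (Int × Int) → List ((Int × Int) × Int × Option (Int × Int)) → List (Int × Int) →
    PySem.Dict (Int × Int) (Int × (Int × Int)) →
    List ((Int × Int) × Int × Option (Int × Int)) × List (Int × Int) ×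
      PySem.Dict (Int × Int) (Int × (Int × Int))
  | [], q, v, info => (q, v, info)
  | n :: ns, q, v, info =>
    if 0 ≤ n.1 ∧ n.1 < width ∧ 0 ≤ n.2 ∧ n.2 < height ∧ n ∉ v ∧ n ∉ wall_set then
      let step := first.getD n
      bfsInnerB wall_set width height dist first ns (q ++ [(n, dist + 1, some step)])
        (PySem.Set.add v n) (info.insert n (dist + 1, step))
    else bfsInnerB wall_set width height dist first ns q v info

-- the full BFS from start: returns the info dict cell ↦ (distance, first step);
-- it stops early once every target has been visited
def bfsAll (wall_set : List (Int × Int)) (width height : Int) (goals : List (Int × Int)) :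
    Nat → List ((Int × Int) × Int × Option (Int × Int)) → List (Int × Int) →
    PySem.Dict (Int × Int) (Int × (Int × Int)) → PySem.Dict (Int × Int) (Int × (Int × Int))
  | 0, _, _, info => info
  | _ + 1, [], _, info => info
  | fuel + 1, (pos, dist, first) :: qs, v, info =>
    if goals.all (fun t => decide (t ∈ v)) = true then info
    else
      match bfsInnerB wall_set width height dist first
          [(pos.1, pos.2 - 1), (pos.1, pos.2 + 1), (pos.1 - 1, pos.2), (pos.1 + 1, pos.2)]
          qs v info with
      | (q', v', info') => bfsAll wall_set width height goals fuel q' v' info'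

def best_approach_alt (start : Int × Int) (item_pos : Int × Int) (wall_set : List (Int × Int)) (width : Int) (height : Int) : (Int × Int) × Int :=
  let goals :=
    [(item_pos.1, item_pos.2 - 1), (item_pos.1, item_pos.2 + 1),
     (item_pos.1 - 1, item_pos.2), (item_pos.1 + 1, item_pos.2)].filter
      (fun c => decide (0 ≤ c.1 ∧ c.1 < width ∧ 0 ≤ c.2 ∧ c.2 < height ∧ c ∉ wall_set))
  let info := bfsAll wall_set width height goals (width.toNat * height.toNat + 1)
    [(start, 0, none)] [start] PySem.Dict.empty
  let cands :=
    goals.map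
      (fun c => if c = start then ((0 : Int), start) else (info.get? c).getD (9999, start))
  -- min(candidates) : first minimal under Python tuple comparison
  match PySem.List.min? cands (fun c => toLex (c.1, toLex c.2)) with
  | none => (start, 9999)
  | some c => (c.2, c.1)

-- ===== PRECONDITION & SPEC =====
def Spec_best_approach (start : Int × Int) (item_pos : Int × Int) (wall_set : List (Int × Int)) (width : Int) (height : Int) (out : (Int × Int) × Int) : Prop := out = best_approach_alt start item_pos wall_set width height
instance (start : Int × Int) (item_pos : Int × Int) (wall_set : List (Int × Int)) (width : Int) (height : Int) (out : (Int × Int) × Int) : Decidable (Spec_best_approach start item_pos wall_set width height out) := by unfold Spec_best_approach; infer_instance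

-- ===== CLAIM (what is proved, stated in full; the proofs are below) =====
def Claim_equal_best_approach : Prop := ∀ (start : Int × Int) (item_pos : Int × Int) (wall_set : List (Int × Int)) (width : Int) (height : Int), Dom_best_approach start item_pos wall_set width height → Spec_best_approach start item_pos wall_set width height (best_approach start item_pos wall_set width height)

-- ===== LEMMAS AND PROOFS =====

-- visited only grows, and a key already in visited keeps its info entry, through one inner pass
theorem bfsInnerB_persist (g : Int × Int) (wall_set : List (Int × Int))
    (width height dist : Int) (first : Option (Int × Int)) :
    ∀ (ns : List (Int × Int)) q v info, g ∈ v →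
      g ∈ (bfsInnerB wall_set width height dist first ns q v info).2.1 ∧
      ((bfsInnerB wall_set width height dist first ns q v info).2.2.get? g = info.get? g) := by
  intro ns
  induction ns with
  | nil => intro q v info hg; simp [bfsInnerB, hg]
  | cons n ns ih =>
    intro q v info hg
    by_cases hc : 0 ≤ n.1 ∧ n.1 < width ∧ 0 ≤ n.2 ∧ n.2 < height ∧ n ∉ v ∧ n ∉ wall_set
    · have hne : g ≠ n := fun h => hc.2.2.2.2.1 (h ▸ hg)
      have hg' : g ∈ PySem.Set.add v n := by simp [PySem.Set.mem_add, hg]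
      have := ih (q ++ [(n, dist + 1, some (first.getD n))]) (PySem.Set.add v n)
        (info.insert n (dist + 1, first.getD n)) hg'
      simp only [bfsInnerB, if_pos hc]
      exact ⟨this.1, this.2.trans (PySem.Dict.get?_insert_of_ne info _ hne)⟩
    · simpa only [bfsInnerB, if_neg hc] using ih q v info hg

-- … and through the whole remaining BFS
theorem bfsAll_persist (g : Int × Int) (wall_set : List (Int × Int)) (width height : Int)
    (goals : List (Int × Int)) :
    ∀ (fuel : Nat) q v info, g ∈ v →
      (bfsAll wall_set width height goals fuel q v info).get? g = info.get? g := by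
  intro fuel
  induction fuel with
  | zero => intro q v info _; simp [bfsAll]
  | succ fuel ih =>
    intro q v info hg
    match q with
    | [] => simp [bfsAll]
    | (pos, dist, first) :: qs =>
      by_cases hstop : goals.all (fun t => decide (t ∈ v)) = true
      · simp only [bfsAll, if_pos hstop]
      · have hin := bfsInnerB_persist g wall_set width height dist first
          [(pos.1, pos.2 - 1), (pos.1, pos.2 + 1), (pos.1 - 1, pos.2), (pos.1 + 1, pos.2)]
          qs v info hg
        simp only [bfsAll, if_neg hstop]
        exact (ih _ _ _ hin.1).trans hin.2

-- one inner pass: A's early-exit loop against B's recording loop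
theorem bfsInner_sim (g : Int × Int) (wall_set : List (Int × Int))
    (width height dist : Int) (first : Option (Int × Int)) :
    ∀ (ns : List (Int × Int)) q v info, g ∉ v → info.get? g = none →
      (∀ q' v', bfsInnerA g wall_set width height dist first ns q v = .inr (q', v') →
        ∃ info', bfsInnerB wall_set width height dist first ns q v info = (q', v', info') ∧
          g ∉ v' ∧ info'.get? g = none) ∧
      (∀ s d, bfsInnerA g wall_set width height dist first ns q v = .inl (s, d) →
        ∃ q' v' info', bfsInnerB wall_set width height dist first ns q v info = (q', v', info') ∧
          g ∈ v' ∧ info'.get? g = some (d, s)) := by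
  intro ns
  induction ns with
  | nil =>
    intro q v info hgv hgi
    refine ⟨fun q' v' h => ?_, fun s d h => ?_⟩
    · simp only [bfsInnerA, Sum.inr.injEq, Prod.mk.injEq] at h
      exact ⟨info, by simp [bfsInnerB, h.1, h.2], h.2 ▸ hgv, hgi⟩
    · simp [bfsInnerA] at h
  | cons n ns ih =>
    intro q v info hgv hgi
    by_cases hb : 0 ≤ n.1 ∧ n.1 < width ∧ 0 ≤ n.2 ∧ n.2 < height
    · by_cases hv : n ∈ v ∨ n ∈ wall_set
      · -- already visited or wall: both sides skip n
        have hcB : ¬ (0 ≤ n.1 ∧ n.1 < width ∧ 0 ≤ n.2 ∧ n.2 < height ∧ n ∉ v ∧ n ∉ wall_set) := by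
          tauto
        have hA : bfsInnerA g wall_set width height dist first (n :: ns) q v =
            bfsInnerA g wall_set width height dist first ns q v := by
          simp only [bfsInnerA, if_neg (not_not_intro hb), if_pos hv]
        have hB : ∀ info0, bfsInnerB wall_set width height dist first (n :: ns) q v info0 =
            bfsInnerB wall_set width height dist first ns q v info0 := by
          intro info0; simp only [bfsInnerB, if_neg hcB]
        rw [hA]
        refine ⟨fun q' v' h => ?_, fun s d h => ?_⟩
        · obtain ⟨info', h1, h2, h3⟩ := (ih q v info hgv hgi).1 q' v' h
          exact ⟨info', (hB info).trans h1, h2, h3⟩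
        · obtain ⟨q', v', info', h1, h2, h3⟩ := (ih q v info hgv hgi).2 s d h
          exact ⟨q', v', info', (hB info).trans h1, h2, h3⟩
      · have hnv : n ∉ v := fun hx => hv (Or.inl hx)
        have hnw : n ∉ wall_set := fun hx => hv (Or.inr hx)
        have hcB : 0 ≤ n.1 ∧ n.1 < width ∧ 0 ≤ n.2 ∧ n.2 < height ∧ n ∉ v ∧ n ∉ wall_set := by
          tauto
        have hB : bfsInnerB wall_set width height dist first (n :: ns) q v info =
            bfsInnerB wall_set width height dist first ns
              (q ++ [(n, dist + 1, some (first.getD n))]) (PySem.Set.add v n)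
              (info.insert n (dist + 1, first.getD n)) := by
          simp only [bfsInnerB, if_pos hcB]
        by_cases hng : n = g
        · -- n is the goal: A returns, B records g and finishes the list
          subst hng
          have hA : bfsInnerA n wall_set width height dist first (n :: ns) q v =
              .inl (first.getD n, dist + 1) := by
            simp only [bfsInnerA, if_neg (not_not_intro hb), if_neg hv]
            simp
          rw [hA]
          refine ⟨fun q' v' h => by simp at h, fun s d h => ?_⟩
          rw [Sum.inl.injEq, Prod.mk.injEq] at h
          obtain ⟨h1, h2⟩ := h
          have hmem : n ∈ PySem.Set.add v n := by simp [PySem.Set.mem_add]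
          have hper := bfsInnerB_persist n wall_set width height dist first ns
            (q ++ [(n, dist + 1, some (first.getD n))]) (PySem.Set.add v n)
            (info.insert n (dist + 1, first.getD n)) hmem
          refine ⟨_, _, _, hB.trans rfl, hper.1, ?_⟩
          rw [hper.2, PySem.Dict.get?_insert_self, ← h1, ← h2]
        · -- a fresh ordinary cell: both sides record it and continue
          have hA : bfsInnerA g wall_set width height dist first (n :: ns) q v =
              bfsInnerA g wall_set width height dist first ns
                (q ++ [(n, dist + 1, some (first.getD n))]) (PySem.Set.add v n) := by
            simp only [bfsInnerA, if_neg (not_not_intro hb), if_neg hv, if_neg hng]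
          have hne : g ≠ n := fun h => hng h.symm
          have hgv' : g ∉ PySem.Set.add v n := by
            simp [PySem.Set.mem_add, hgv, hne]
          have hgi' : (info.insert n (dist + 1, first.getD n)).get? g = none := by
            rw [PySem.Dict.get?_insert_of_ne info _ hne, hgi]
          rw [hA]
          refine ⟨fun q' v' h => ?_, fun s d h => ?_⟩
          · obtain ⟨info', h1, h2, h3⟩ := (ih _ _ _ hgv' hgi').1 q' v' h
            exact ⟨info', hB.trans h1, h2, h3⟩
          · obtain ⟨q', v', info', h1, h2, h3⟩ := (ih _ _ _ hgv' hgi').2 s d h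
            exact ⟨q', v', info', hB.trans h1, h2, h3⟩
    · -- out of bounds: both sides skip n
      have hcB : ¬ (0 ≤ n.1 ∧ n.1 < width ∧ 0 ≤ n.2 ∧ n.2 < height ∧ n ∉ v ∧ n ∉ wall_set) := by
        tauto
      have hA : bfsInnerA g wall_set width height dist first (n :: ns) q v =
          bfsInnerA g wall_set width height dist first ns q v := by
        simp only [bfsInnerA, if_pos hb]
      have hB : ∀ info0, bfsInnerB wall_set width height dist first (n :: ns) q v info0 =
          bfsInnerB wall_set width height dist first ns q v info0 := by
        intro info0; simp only [bfsInnerB, if_neg hcB]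
      rw [hA]
      refine ⟨fun q' v' h => ?_, fun s d h => ?_⟩
      · obtain ⟨info', h1, h2, h3⟩ := (ih q v info hgv hgi).1 q' v' h
        exact ⟨info', (hB info).trans h1, h2, h3⟩
      · obtain ⟨q', v', info', h1, h2, h3⟩ := (ih q v info hgv hgi).2 s d h
        exact ⟨q', v', info', (hB info).trans h1, h2, h3⟩

-- the goal-stopped BFS of A equals a lookup in B's full BFS table
theorem bfsLoop_sim (start g : Int × Int) (wall_set : List (Int × Int)) (width height : Int)
    (goals : List (Int × Int)) (hgoal : g ∈ goals) :
    ∀ (fuel : Nat) q v info, g ∉ v → info.get? g = none →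
      bfsLoopA start g wall_set width height fuel q v =
        (match (bfsAll wall_set width height goals fuel q v info).get? g with
         | some (d, s) => (s, d)
         | none => (start, 9999)) := by
  intro fuel
  induction fuel with
  | zero => intro q v info _ hgi; simp [bfsLoopA, bfsAll, hgi]
  | succ fuel ih =>
    intro q v info hgv hgi
    match q with
    | [] => simp [bfsLoopA, bfsAll, hgi]
    | (pos, dist, first) :: qs =>
      have hstop : ¬ (goals.all (fun t => decide (t ∈ v)) = true) := fun hall =>
        hgv (of_decide_eq_true (List.all_eq_true.1 hall g hgoal))
      have hsim := bfsInner_sim g wall_set width height dist first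
        [(pos.1, pos.2 - 1), (pos.1, pos.2 + 1), (pos.1 - 1, pos.2), (pos.1 + 1, pos.2)]
        qs v info hgv hgi
      cases hA : bfsInnerA g wall_set width height dist first
          [(pos.1, pos.2 - 1), (pos.1, pos.2 + 1), (pos.1 - 1, pos.2), (pos.1 + 1, pos.2)]
          qs v with
      | inl r =>
        obtain ⟨s, d⟩ := r
        obtain ⟨q', v', info', h1, h2, h3⟩ := hsim.2 s d hA
        simp only [bfsLoopA, bfsAll, if_neg hstop, hA, h1]
        rw [bfsAll_persist g wall_set width height goals fuel q' v' info' h2, h3]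
      | inr p =>
        obtain ⟨q', v'⟩ := p
        obtain ⟨info', h1, h2, h3⟩ := hsim.1 q' v' hA
        simp only [bfsLoopA, bfsAll, if_neg hstop, hA, h1]
        exact ih q' v' info' h2 h3

-- the sort/min key is injective
theorem pvKey_inj : Function.Injective
    (fun c : Int × Int × Int => toLex (c.1, toLex c.2)) := by
  intro a b h
  have h' := toLex.injective h
  have h1 : a.1 = b.1 := congrArg Prod.fst h'
  have h2 : toLex a.2 = toLex b.2 := congrArg Prod.snd h'
  exact Prod.ext h1 (toLex.injective h2)

-- head of Python's sorted list = Python's min, for an injective key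
theorem head_sorted_eq_min (xs : List (Int × Int × Int)) (c : Int × Int × Int)
    (t : List (Int × Int × Int))
    (h : PySem.List.sorted xs (fun c : Int × Int × Int => toLex (c.1, toLex c.2)) false = c :: t) :
    PySem.List.min? xs (fun c : Int × Int × Int => toLex (c.1, toLex c.2)) = some c := by
  have hne : xs ≠ [] := by
    intro hx
    rw [hx] at h
    simp [PySem.List.sorted] at h
  cases hm : PySem.List.min? xs (fun c : Int × Int × Int => toLex (c.1, toLex c.2)) with
  | none => exact absurd ((PySem.List.min?_eq_none_iff _ _).1 hm) hne
  | some m =>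
    have hmem : m ∈ xs := PySem.List.min?_mem hm
    have hcm : c ∈ xs := (PySem.List.mem_sorted _ _ _ _).1 (h ▸ List.mem_cons_self)
    have h1 := PySem.List.key_head_sorted_le xs (fun c : Int × Int × Int => toLex (c.1, toLex c.2)) h m hmem
    have h2 := PySem.List.min?_isMin hm c hcm
    exact congrArg some (pvKey_inj (le_antisymm h2 h1)).symm ▸ rfl

-- A's per-candidate entry (d, nc) is B's table lookup
theorem cand_eq (start : Int × Int) (wall_set : List (Int × Int)) (width height : Int)
    (goals : List (Int × Int)) (n : Int × Int) (hgoal : n ∈ goals) :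
    candA start wall_set width height n =
      if n = start then ((0 : Int), start)
      else ((bfsAll wall_set width height goals (width.toNat * height.toNat + 1)
        [(start, 0, none)] [start] PySem.Dict.empty).get? n).getD (9999, start) := by
  by_cases hs : n = start
  · subst hs; simp [candA, bfs_next_step]
  · have h1 : start ≠ n := fun h => hs h.symm
    have hnv : n ∉ ([start] : List (Int × Int)) := by simp [hs]
    have hge : (PySem.Dict.empty : PySem.Dict (Int × Int) (Int × (Int × Int))).get? n = none := by
      simp
    rw [candA, bfs_next_step, if_neg h1,
      bfsLoop_sim start n wall_set width height goals hgoal _ _ _ _ hnv hge, if_neg hs]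
    cases hx : (bfsAll wall_set width height goals (width.toNat * height.toNat + 1)
        [(start, 0, none)] [start] PySem.Dict.empty).get? n with
    | none => simp
    | some ds => obtain ⟨d, s⟩ := ds; simp

-- ===== VERDICT (by name: the statement is the Claim_ definition above) =====
theorem best_approach_spec : Claim_equal_best_approach := by
  intro start item_pos wall_set width height _
  unfold Spec_best_approach best_approach best_approach_alt
  dsimp only
  rw [PySem.List.foldl_append_if
    (fun n : Int × Int => decide (0 ≤ n.1 ∧ n.1 < width ∧ 0 ≤ n.2 ∧ n.2 < height ∧ n ∉ wall_set))
    (candA start wall_set width height), List.nil_append]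
  have hmap : ([(item_pos.1, item_pos.2 - 1), (item_pos.1, item_pos.2 + 1),
      (item_pos.1 - 1, item_pos.2), (item_pos.1 + 1, item_pos.2)].filter
      (fun n : Int × Int => decide (0 ≤ n.1 ∧ n.1 < width ∧ 0 ≤ n.2 ∧ n.2 < height ∧ n ∉ wall_set))).map
      (candA start wall_set width height) =
    ([(item_pos.1, item_pos.2 - 1), (item_pos.1, item_pos.2 + 1),
      (item_pos.1 - 1, item_pos.2), (item_pos.1 + 1, item_pos.2)].filter
      (fun n : Int × Int => decide (0 ≤ n.1 ∧ n.1 < width ∧ 0 ≤ n.2 ∧ n.2 < height ∧ n ∉ wall_set))).map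
      (fun c : Int × Int =>
        if c = start then ((0 : Int), start)
        else ((bfsAll wall_set width height
          ([(item_pos.1, item_pos.2 - 1), (item_pos.1, item_pos.2 + 1),
            (item_pos.1 - 1, item_pos.2), (item_pos.1 + 1, item_pos.2)].filter
            (fun n : Int × Int => decide (0 ≤ n.1 ∧ n.1 < width ∧ 0 ≤ n.2 ∧ n.2 < height ∧ n ∉ wall_set)))
          (width.toNat * height.toNat + 1)
          [(start, 0, none)] [start] PySem.Dict.empty).get? c).getD (9999, start)) :=
    List.map_congr_left (fun n hn => cand_eq start wall_set width height _ n hn)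
  rw [hmap]
  set L : List (Int × Int × Int) :=
    ([(item_pos.1, item_pos.2 - 1), (item_pos.1, item_pos.2 + 1),
      (item_pos.1 - 1, item_pos.2), (item_pos.1 + 1, item_pos.2)].filter
      (fun n : Int × Int => decide (0 ≤ n.1 ∧ n.1 < width ∧ 0 ≤ n.2 ∧ n.2 < height ∧ n ∉ wall_set))).map
      (fun c : Int × Int =>
        if c = start then ((0 : Int), start)
        else ((bfsAll wall_set width height
          ([(item_pos.1, item_pos.2 - 1), (item_pos.1, item_pos.2 + 1),
            (item_pos.1 - 1, item_pos.2), (item_pos.1 + 1, item_pos.2)].filter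
            (fun n : Int × Int => decide (0 ≤ n.1 ∧ n.1 < width ∧ 0 ≤ n.2 ∧ n.2 < height ∧ n ∉ wall_set)))
          (width.toNat * height.toNat + 1)
          [(start, 0, none)] [start] PySem.Dict.empty).get? c).getD (9999, start)) with hLdef
  cases hs : PySem.List.sorted L (fun c : Int × Int × Int => toLex (c.1, toLex c.2)) false with
  | nil =>
    have hL := (PySem.List.sorted_eq_nil_iff _ _ _).1 hs
    rw [hL]
    simp [PySem.List.min?]
  | cons c t =>
    rw [head_sorted_eq_min _ c t hs]
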